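-- pv_equiv track=rewrite | github.com/yohannes-taye/videoflo | prepare.py | get_vids_shot_on_same_date
-- ===== SOURCE A (Python) =====
-- def get_vids_shot_on_same_date(files):
--     #Create a dictionary to hold the files
--     files_dict = {}
--     #Loop through the files
--     for file in files:
--         #Split the file name with '_' to get the date
--         date = file.split('_')[1]
--         #Check if the date is in the dictionary
--         if date in files_dict:
--             #If it is, append the file to the list
--             files_dict[date].append(file)
--         else:
--             #If it isn't, create a new list with the file in it
--             files_dict[date] = [file]
--     #Return the dictionary
--     return files_dict
-- ===== SOURCE B (Python) =====
-- def get_vids_shot_on_same_date(files):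
--     # Two-pass: collect distinct dates in first-appearance order, then one
--     # filter pass per date (dict comprehension), instead of A's single-pass
--     # dict mutation.
--     dates = []
--     for f in files:
--         d = f.split('_')[1]
--         if d not in dates:
--             dates.append(d)
--     return {d: [f for f in files if f.split('_')[1] == d] for d in dates}
-- ===== Notes on version B (the rewrite author's own statement) =====
-- stated objective: alternative
-- what changed: Replaces A's single-pass dict mutation (append-or-create per file) with a two-pass scheme: collect the distinct dates in first-appearance order, then build the dict by one filter comprehension per date.
import Mathlib
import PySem

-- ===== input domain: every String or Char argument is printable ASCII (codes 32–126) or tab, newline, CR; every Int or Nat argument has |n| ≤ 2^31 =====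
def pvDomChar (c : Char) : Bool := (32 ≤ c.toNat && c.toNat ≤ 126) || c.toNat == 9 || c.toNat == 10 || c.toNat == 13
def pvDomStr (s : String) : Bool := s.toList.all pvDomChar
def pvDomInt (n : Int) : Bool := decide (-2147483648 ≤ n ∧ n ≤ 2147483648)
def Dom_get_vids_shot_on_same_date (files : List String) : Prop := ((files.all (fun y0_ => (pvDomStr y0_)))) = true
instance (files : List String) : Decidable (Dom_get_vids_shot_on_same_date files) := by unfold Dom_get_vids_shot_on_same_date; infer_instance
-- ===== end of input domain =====

-- ===== PORT A =====
-- B regroups by one filter pass per distinct date instead of A's single-pass dict mutation; equal output incl. key order.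
-- date key: file.split('_')[1]  (total form; Pre_ excludes names where Python's [1] raises IndexError)
def pvKey (file : String) : String :=
  (PySem.List.pyGet? ((PySem.Str.split? file "_").getD []) 1).getD ""

def get_vids_shot_on_same_date (files : List String) : List (String × List String) :=
  (files.foldl (fun files_dict file =>
      let date := pvKey file
      match files_dict.get? date with
      | some lst => files_dict.insert date (lst ++ [file])
      | none     => files_dict.insert date [file])
    (PySem.Dict.empty : PySem.Dict String (List String))).items

-- ===== PORT B =====
def get_vids_shot_on_same_date_alt (files : List String) : List (String × List String) :=
  let dates : PySem.Set String :=
    files.foldl (fun ds f => PySem.Set.add ds (pvKey f)) PySem.Set.empty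
  dates.map (fun d => (d, files.filter (fun f => pvKey f == d)))

-- ===== PRECONDITION & SPEC =====
-- Python A raises IndexError on any file name without '_' (split gives fewer than 2 parts); B raises there too.
def Pre_get_vids_shot_on_same_date (files : List String) : Prop :=
  ∀ f ∈ files, 2 ≤ ((PySem.Str.split? f "_").getD []).length
instance (files : List String) : Decidable (Pre_get_vids_shot_on_same_date files) := by unfold Pre_get_vids_shot_on_same_date; infer_instance
def pvWitness_get_vids_shot_on_same_date : List String :=
  ["IMG_20210101_a.mp4", "clip_20210101.mp4", "x_20220202_b.mp4"]

def Spec_get_vids_shot_on_same_date (files : List String) (out : List (String × List String)) : Prop := out = get_vids_shot_on_same_date_alt files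
instance (files : List String) (out : List (String × List String)) : Decidable (Spec_get_vids_shot_on_same_date files out) := by unfold Spec_get_vids_shot_on_same_date; infer_instance

-- ===== CLAIM (what is proved, stated in full; the proofs are below) =====
def Claim_equal_get_vids_shot_on_same_date : Prop := ∀ (files : List String), Dom_get_vids_shot_on_same_date files → Pre_get_vids_shot_on_same_date files → Spec_get_vids_shot_on_same_date files (get_vids_shot_on_same_date files)

-- ===== LEMMAS AND PROOFS =====

-- A's loop body is exactly Dict.modify with default [] and append
theorem pvStepA (d : PySem.Dict String (List String)) (file : String) :
    (match d.get? (pvKey file) with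
     | some lst => d.insert (pvKey file) (lst ++ [file])
     | none     => d.insert (pvKey file) [file]) =
    d.modify (pvKey file) [] (· ++ [file]) := by
  cases h : d.get? (pvKey file) <;>
    simp [PySem.Dict.modify, PySem.Dict.getD_eq_get?_getD, h]

-- both programs compute the canonical grouping: distinct keys in first-appearance
-- order, each paired with the filter of files sharing that key
theorem pvA_canon (files : List String) :
    get_vids_shot_on_same_date files =
      (PySem.Set.ofList (files.map pvKey)).map
        (fun c => (c, files.filter (fun f => pvKey f == c))) := by
  unfold get_vids_shot_on_same_date
  have hfun : (fun (files_dict : PySem.Dict String (List String)) (file : String) =>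
      let date := pvKey file
      match files_dict.get? date with
      | some lst => files_dict.insert date (lst ++ [file])
      | none     => files_dict.insert date [file]) =
      (fun d x => d.modify (pvKey x) [] ((fun (_ : PySem.Dict String (List String)) (x : String) => (· ++ [x])) d x)) := by
    funext d file
    exact pvStepA d file
  rw [hfun]
  have hnd : (files.foldl (fun d x => d.modify (pvKey x) [] ((fun (_ : PySem.Dict String (List String)) (x : String) => (· ++ [x])) d x)) PySem.Dict.empty).keys.Nodup :=
    PySem.Dict.nodup_keys_foldl_modify_key files pvKey [] _ _ (by simp [PySem.Dict.keys_empty])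
  rw [PySem.Dict.items_eq_map_keys _ hnd []]
  rw [PySem.Dict.keys_foldl_modify_key files pvKey [] _ PySem.Dict.empty]
  rw [show (PySem.Dict.empty : PySem.Dict String (List String)).keys = PySem.Set.empty from rfl, PySem.Set.update_empty]
  refine List.map_congr_left (fun c hc => ?_)
  congr 1
  have hfold : files.foldl (fun d x => d.modify (pvKey x) [] ((fun (_ : PySem.Dict String (List String)) (x : String) => (· ++ [x])) d x)) PySem.Dict.empty =
      (files.map (fun f => (pvKey f, f))).foldl (fun d p => d.modify p.1 [] (· ++ [p.2])) PySem.Dict.empty := by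
    rw [List.foldl_map]
  rw [hfold, PySem.Dict.getD_foldl_modify_append, PySem.Dict.getD_empty]
  rw [List.filter_map]
  simp [Function.comp_def]

theorem pvB_canon (files : List String) :
    get_vids_shot_on_same_date_alt files =
      (PySem.Set.ofList (files.map pvKey)).map
        (fun c => (c, files.filter (fun f => pvKey f == c))) := by
  unfold get_vids_shot_on_same_date_alt
  rw [← PySem.Set.update_map_eq_foldl_add files pvKey PySem.Set.empty, PySem.Set.update_empty]

-- ===== VERDICT (by name: the statement is the Claim_ definition above) =====
theorem get_vids_shot_on_same_date_spec : Claim_equal_get_vids_shot_on_same_date := by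
  intro files _ _
  unfold Spec_get_vids_shot_on_same_date
  rw [pvA_canon, pvB_canon]
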